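-- pv_equiv track=rewrite | github.com/mamagasalana/video_transcript | normalize_transcript.py | _normalize_with_map
-- ===== SOURCE A (Python) =====
-- from typing import List, Tuple
--
-- def _normalize_with_map(s: str) -> Tuple[str, List[int]]:
--     norm_chars: List[str] = []
--     norm2raw: List[int] = []
--
--     i, n = 0, len(s)
--     while i < n:
--         ch = s[i]
--         if ch.isspace():
--             # consume whitespace run
--             j = i
--             while j < n and s[j].isspace():
--                 j += 1
--
--             i = j
--         else:
--             norm_chars.append(ch)
--             norm2raw.append(i)
--             i += 1
--
--     return "".join(norm_chars), norm2raw
-- ===== SOURCE B (Python) =====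
-- from typing import List, Tuple
--
-- def _normalize_with_map(s: str) -> Tuple[str, List[int]]:
--     # Pass 1: build the kept-index table directly.
--     norm2raw = [i for i, ch in enumerate(s) if not ch.isspace()]
--     # Pass 2: reconstruct the normalized string from the table.
--     norm = ''.join(s[i] for i in norm2raw)
--     return norm, norm2raw
-- ===== Notes on version B (the rewrite author's own statement) =====
-- stated objective: simpler
-- what changed: Replaces A's index-driven while loop with its redundant inner whitespace-run-consuming loop by two flat passes: a comprehension that builds the kept-index table, then reconstruction of the normalized string by indexing back into s.
import Mathlib
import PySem

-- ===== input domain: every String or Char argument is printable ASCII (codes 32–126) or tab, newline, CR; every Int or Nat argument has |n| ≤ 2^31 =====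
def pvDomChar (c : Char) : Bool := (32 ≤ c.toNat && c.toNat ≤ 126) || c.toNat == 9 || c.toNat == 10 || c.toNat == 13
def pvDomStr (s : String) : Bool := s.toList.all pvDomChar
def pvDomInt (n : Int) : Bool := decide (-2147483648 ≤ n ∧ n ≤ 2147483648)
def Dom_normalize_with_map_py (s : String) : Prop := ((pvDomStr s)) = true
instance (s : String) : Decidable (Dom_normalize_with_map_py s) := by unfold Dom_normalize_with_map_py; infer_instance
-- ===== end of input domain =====

-- B replaces A's while loop (with its inner whitespace-run loop) by two flat passes:
-- build the kept-index table, then reconstruct the string from it; objective: simpler.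

-- ===== PORT A =====
-- inner 'while j < n and s[j].isspace(): j += 1'
def pvSkipWs (cs : List Char) (n j : Nat) : Nat :=
  if _h : j < n then
    if PySem.Chars.isspace (cs.getD j ' ') then pvSkipWs cs n (j + 1) else j
  else j
termination_by n - j

theorem pvSkipWs_ge (cs : List Char) (n j : Nat) : j ≤ pvSkipWs cs n j := by
  unfold pvSkipWs
  split_ifs with h1 h2
  · exact le_trans (Nat.le_succ j) (pvSkipWs_ge cs n (j + 1))
  · exact le_refl j
  · exact le_refl j
termination_by n - j

-- outer 'while i < n'
def pvLoopA (cs : List Char) (n i : Nat) (norm : List Char) (map : List Int) :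
    List Char × List Int :=
  if h : i < n then
    -- ch = s[i]
    if PySem.Chars.isspace (cs.getD i ' ') then
      pvLoopA cs n (pvSkipWs cs n i) norm map
    else
      pvLoopA cs n (i + 1) (norm ++ [cs.getD i ' ']) (map ++ [(i : Int)])
  else (norm, map)
termination_by n - i
decreasing_by
  · rename_i hs
    have h1 : i + 1 ≤ pvSkipWs cs n i := by
      unfold pvSkipWs; rw [dif_pos h, if_pos hs]; exact pvSkipWs_ge cs n (i + 1)
    omega
  · omega

def normalize_with_map_py (s : String) : String × List Int :=
  let cs := s.toList
  let r := pvLoopA cs cs.length 0 [] []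
  (String.ofList r.1, r.2)

-- ===== PORT B =====
def normalize_with_map_py_alt (s : String) : String × List Int :=
  let cs := s.toList
  -- norm2raw = [i for i, ch in enumerate(s) if not ch.isspace()]
  let norm2raw := ((PySem.List.enumerate cs 0).filter
      (fun p => !PySem.Chars.isspace p.2)).map (·.1)
  -- norm = ''.join(s[i] for i in norm2raw)   (every i is a valid index, so getD never defaults)
  let norm := String.ofList (norm2raw.map (fun i => (PySem.List.pyGet? cs i).getD ' '))
  (norm, norm2raw)

-- ===== PRECONDITION & SPEC =====
def Spec_normalize_with_map_py (s : String) (out : String × List Int) : Prop := out = normalize_with_map_py_alt s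
instance (s : String) (out : String × List Int) : Decidable (Spec_normalize_with_map_py s out) := by unfold Spec_normalize_with_map_py; infer_instance

-- ===== CLAIM (what is proved, stated in full; the proofs are below) =====
def Claim_equal_normalize_with_map_py : Prop := ∀ (s : String), Dom_normalize_with_map_py s → Spec_normalize_with_map_py s (normalize_with_map_py s)

-- ===== LEMMAS AND PROOFS =====

-- common specification: filter of the suffix starting at i, paired with indices
def pvSpecF : List Char → Nat → List Char × List Int
  | [], _ => ([], [])
  | c :: t, i =>
    if PySem.Chars.isspace c then pvSpecF t (i + 1)
    else
      let r := pvSpecF t (i + 1)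
      (c :: r.1, (i : Int) :: r.2)

theorem pvSkipWs_le (cs : List Char) (n j : Nat) (h : j ≤ n) : pvSkipWs cs n j ≤ n := by
  unfold pvSkipWs
  split_ifs with h1 h2
  · exact pvSkipWs_le cs n (j + 1) h1
  · exact h
  · exact h
termination_by n - j

theorem pvSkipWs_space (cs : List Char) (n j m : Nat) (h1 : j ≤ m)
    (h2 : m < pvSkipWs cs n j) : PySem.Chars.isspace (cs.getD m ' ') = true := by
  unfold pvSkipWs at h2
  split_ifs at h2 with ha hb
  · rcases Nat.eq_or_lt_of_le h1 with rfl | hlt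
    · exact hb
    · exact pvSkipWs_space cs n (j + 1) m hlt h2
  · omega
  · omega
termination_by n - j
decreasing_by omega

theorem pvSpecF_drop_step (cs : List Char) (i : Nat) (h : i < cs.length)
    (hs : PySem.Chars.isspace (cs.getD i ' ') = true) :
    pvSpecF (cs.drop i) i = pvSpecF (cs.drop (i + 1)) (i + 1) := by
  rw [List.drop_eq_getElem_cons h]
  have : cs.getD i ' ' = cs[i] := List.getD_eq_getElem cs ' ' h
  simp [pvSpecF, this ▸ hs]

theorem pvSpecF_skip (cs : List Char) (i j : Nat) (hij : i ≤ j) (hj : j ≤ cs.length)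
    (hsp : ∀ m, i ≤ m → m < j → PySem.Chars.isspace (cs.getD m ' ') = true) :
    pvSpecF (cs.drop i) i = pvSpecF (cs.drop j) j := by
  rcases Nat.eq_or_lt_of_le hij with rfl | hlt
  · rfl
  · rw [pvSpecF_drop_step cs i (by omega) (hsp i le_rfl hlt)]
    exact pvSpecF_skip cs (i + 1) j hlt hj (fun m hm hmj => hsp m (by omega) hmj)
termination_by j - i

theorem pvLoopA_eq (cs : List Char) (i : Nat) (hi : i ≤ cs.length)
    (norm : List Char) (map : List Int) :
    pvLoopA cs cs.length i norm map =
      (norm ++ (pvSpecF (cs.drop i) i).1, map ++ (pvSpecF (cs.drop i) i).2) := by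
  rw [pvLoopA]
  by_cases h1 : i < cs.length
  · rw [dif_pos h1]
    by_cases hs : PySem.Chars.isspace (cs.getD i ' ') = true
    · rw [if_pos hs]
      have hge : i + 1 ≤ pvSkipWs cs cs.length i := by
        unfold pvSkipWs; rw [dif_pos h1, if_pos hs]; exact pvSkipWs_ge cs cs.length (i + 1)
      have hle : pvSkipWs cs cs.length i ≤ cs.length := pvSkipWs_le cs cs.length i hi
      rw [pvLoopA_eq cs (pvSkipWs cs cs.length i) hle norm map,
          pvSpecF_skip cs i (pvSkipWs cs cs.length i) (by omega) hle
            (fun m hm hmj => pvSkipWs_space cs cs.length i m hm hmj)]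
    · rw [if_neg hs]
      rw [pvLoopA_eq cs (i + 1) (by omega) (norm ++ [cs.getD i ' ']) (map ++ [(i : Int)])]
      rw [List.drop_eq_getElem_cons h1]
      have hgd : cs.getD i ' ' = cs[i] := List.getD_eq_getElem cs ' ' h1
      rw [hgd] at hs ⊢
      simp [pvSpecF, hs]
  · rw [dif_neg h1]
    have : i = cs.length := by omega
    subst this
    simp [pvSpecF]
termination_by cs.length - i
decreasing_by
  · omega
  · omega

theorem pvAlt_eq (cs : List Char) (i : Nat) (hi : i ≤ cs.length) :
    (((PySem.List.enumerate (cs.drop i) (i : Int)).filter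
        (fun p => !PySem.Chars.isspace p.2)).map (·.1) = (pvSpecF (cs.drop i) i).2) ∧
    ((((PySem.List.enumerate (cs.drop i) (i : Int)).filter
        (fun p => !PySem.Chars.isspace p.2)).map (·.1)).map
      (fun k => (PySem.List.pyGet? cs k).getD ' ') = (pvSpecF (cs.drop i) i).1) := by
  rcases Nat.eq_or_lt_of_le hi with rfl | hlt
  · simp [pvSpecF]
  · have ih := pvAlt_eq cs (i + 1) (by omega)
    rw [List.drop_eq_getElem_cons hlt]
    have hcast : (i : Int) + 1 = ((i + 1 : Nat) : Int) := by push_cast; ring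
    rw [PySem.List.enumerate_cons, hcast]
    by_cases hs : PySem.Chars.isspace cs[i] = true
    · rw [List.filter_cons_of_neg (by simp [hs])]
      constructor
      · rw [ih.1]; simp [pvSpecF, hs]
      · rw [ih.2]; simp [pvSpecF, hs]
    · have hget : PySem.List.pyGet? cs (i : Int) = some cs[i] := by
        rw [PySem.List.pyGet?_natCast]; exact List.getElem?_eq_getElem hlt
      rw [List.filter_cons_of_pos (by simp [hs])]
      constructor
      · rw [List.map_cons, ih.1]; simp [pvSpecF, hs]
      · rw [List.map_cons, List.map_cons, ih.2, hget]; simp [pvSpecF, hs]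
termination_by cs.length - i

-- ===== VERDICT (by name: the statement is the Claim_ definition above) =====
theorem normalize_with_map_py_spec : Claim_equal_normalize_with_map_py := by
  intro s _
  unfold Spec_normalize_with_map_py normalize_with_map_py normalize_with_map_py_alt
  have hA := pvLoopA_eq s.toList 0 (Nat.zero_le _) [] []
  have hB := pvAlt_eq s.toList 0 (Nat.zero_le _)
  simp only [List.drop_zero, Int.natCast_zero, List.nil_append] at hA hB
  simp only [hA]
  rw [← hB.1, hB.2, hB.1]
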